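-- pv_equiv track=rewrite | github.com/vuong83op/tool | analyzer.py | _analyze_repetition_patterns
-- ===== SOURCE A (Python) =====
-- from collections import defaultdict, Counter
--
-- def _analyze_repetition_patterns(data):
--     """Phân tích pattern về số lặp lại"""
--     repetition_count = defaultdict(int)
--
--     for result in data:
--         gdb = result['giai_dac_biet']
--         digit_count = Counter(gdb)
--         max_repetition = max(digit_count.values())
--         repetition_count[max_repetition] += 1
--
--     return dict(repetition_count)
-- ===== SOURCE B (Python) =====
-- def _analyze_repetition_patterns(data):
--     """Phân tích pattern về số lặp lại"""
--     repetition_count = {}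
--     for result in data:
--         chars = sorted(result['giai_dac_biet'])
--         runs = []
--         run = 0
--         for i, c in enumerate(chars):
--             run += 1
--             if i + 1 == len(chars) or chars[i + 1] != c:
--                 runs.append(run)
--                 run = 0
--         max_repetition = max(runs)  # empty string -> ValueError, as in A
--         repetition_count[max_repetition] = repetition_count.get(max_repetition, 0) + 1
--     return repetition_count
-- ===== Notes on version B (the rewrite author's own statement) =====
-- stated objective: alternative
-- what changed: Per entry, the maximal character multiplicity is computed by sorting the string and scanning consecutive runs instead of building a Counter hash table and taking max of its values; Pre_ excludes only inputs where both programs raise (missing 'giai_dac_biet' key -> KeyError, empty value -> ValueError).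
import Mathlib
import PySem

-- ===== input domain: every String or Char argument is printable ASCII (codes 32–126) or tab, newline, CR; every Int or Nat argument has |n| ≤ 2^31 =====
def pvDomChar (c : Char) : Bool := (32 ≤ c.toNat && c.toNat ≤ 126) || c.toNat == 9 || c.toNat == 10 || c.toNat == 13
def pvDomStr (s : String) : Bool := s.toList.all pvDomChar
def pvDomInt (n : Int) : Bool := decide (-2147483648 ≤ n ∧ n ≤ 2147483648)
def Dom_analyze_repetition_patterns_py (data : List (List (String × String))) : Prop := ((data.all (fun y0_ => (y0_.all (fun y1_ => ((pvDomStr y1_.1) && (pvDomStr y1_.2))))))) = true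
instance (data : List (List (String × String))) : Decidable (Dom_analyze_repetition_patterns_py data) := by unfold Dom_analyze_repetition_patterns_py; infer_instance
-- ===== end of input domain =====

-- B computes each entry's maximal character multiplicity by sorting the string and scanning
-- consecutive runs, instead of A's Counter hash-count + max of values; return values agree on Pre_.

-- ===== PORT A =====
-- A: for each result, Counter(result['giai_dac_biet']), max of its values, bump a defaultdict.
-- Missing key (KeyError) / empty string (ValueError from max) are excluded by Pre_; the
-- .getD fallbacks below are only reached outside Pre_.
def analyze_repetition_patterns_py (data : List (List (String × String))) : List (Int × Int) :=
  (data.foldl (fun (repetition_count : PySem.Dict Int Int) result =>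
      let gdb := ((PySem.Dict.ofList result).get? "giai_dac_biet").getD ""
      let digit_count := PySem.Dict.counter gdb.toList
      let max_repetition := (PySem.List.max? digit_count.values (fun v => v)).getD 0
      repetition_count.modify max_repetition 0 (· + 1))
    PySem.Dict.empty).items

-- ===== PORT B =====
-- the inner `for i, c in enumerate(chars)` loop of Source B: walks the sorted list comparing each
-- element with its successor, collecting the finished run lengths (run = current run so far)
def pvRuns : List Char → Int → List Int
  | [], _run => []
  | [_c], run => [run + 1]
  | c :: c' :: rest, run =>
      if c' ≠ c then (run + 1) :: pvRuns (c' :: rest) 0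
      else pvRuns (c' :: rest) (run + 1)

def analyze_repetition_patterns_py_alt (data : List (List (String × String))) : List (Int × Int) :=
  (data.foldl (fun (repetition_count : PySem.Dict Int Int) result =>
      let chars := PySem.List.sorted (((PySem.Dict.ofList result).get? "giai_dac_biet").getD "").toList (fun c => c) false
      let runs := pvRuns chars 0
      let max_repetition := (PySem.List.max? runs (fun v => v)).getD 0
      repetition_count.insert max_repetition (repetition_count.getD max_repetition 0 + 1))
    PySem.Dict.empty).items

-- ===== PRECONDITION & SPEC =====
-- Pre_ excludes exactly the inputs where A raises: an entry without the key 'giai_dac_biet'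
-- (KeyError) or whose value is the empty string (ValueError from max() on no values).
def Pre_analyze_repetition_patterns_py (data : List (List (String × String))) : Prop :=
  ∀ result ∈ data, ((PySem.Dict.ofList result).get? "giai_dac_biet").getD "" ≠ ""
instance (data : List (List (String × String))) : Decidable (Pre_analyze_repetition_patterns_py data) := by unfold Pre_analyze_repetition_patterns_py; infer_instance

def pvWitness_analyze_repetition_patterns_py : (List (List (String × String))) :=
  [[("giai_dac_biet", "12321")], [("giai_dac_biet", "77")]]

def Spec_analyze_repetition_patterns_py (data : List (List (String × String))) (out : List (Int × Int)) : Prop := out = analyze_repetition_patterns_py_alt data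
instance (data : List (List (String × String))) (out : List (Int × Int)) : Decidable (Spec_analyze_repetition_patterns_py data out) := by unfold Spec_analyze_repetition_patterns_py; infer_instance

-- ===== CLAIM (what is proved, stated in full; the proofs are below) =====
def Claim_equal_analyze_repetition_patterns_py : Prop := ∀ (data : List (List (String × String))), Dom_analyze_repetition_patterns_py data → Pre_analyze_repetition_patterns_py data → Spec_analyze_repetition_patterns_py data (analyze_repetition_patterns_py data)

-- ===== LEMMAS AND PROOFS =====

lemma pvRuns_ne_nil (c : Char) (t : List Char) (k : Int) : pvRuns (c :: t) k ≠ [] := by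
  induction t generalizing c k with
  | nil => simp [pvRuns]
  | cons c' r ih =>
      simp only [pvRuns]
      split
      · simp
      · exact ih c' (k + 1)

-- head-run characterisation of pvRuns on a list whose minimum is its head
lemma pvRuns_head (t : List Char) (c : Char) (k : Int)
    (hle : ∀ y ∈ t, c ≤ y) (hp : t.Pairwise (· ≤ ·)) :
    pvRuns (c :: t) k = (k + 1 + (t.count c : Int)) :: pvRuns (t.dropWhile (· == c)) 0 := by
  induction t generalizing c k with
  | nil => simp [pvRuns]
  | cons c' r ih =>
      by_cases hcc : c' = c
      · subst hcc
        have h1 : pvRuns (c' :: c' :: r) k = pvRuns (c' :: r) (k + 1) := by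
          simp [pvRuns]
        rw [h1, ih c' (k + 1) (fun y hy => (List.pairwise_cons.mp hp).1 y hy) (List.pairwise_cons.mp hp).2]
        simp only [List.count_cons, List.dropWhile_cons, beq_self_eq_true, if_true]
        congr 1
        push_cast; ring
      · have h1 : pvRuns (c :: c' :: r) k = (k + 1) :: pvRuns (c' :: r) 0 := by
          simp [pvRuns, hcc]
        have hclt : c < c' := lt_of_le_of_ne (hle c' (by simp)) (fun h => hcc h.symm)
        have hnotin : c ∉ c' :: r := by
          intro hin
          rcases List.mem_cons.mp hin with h | h
          · exact hcc h.symm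
          · exact absurd ((List.pairwise_cons.mp hp).1 c h) (by intro hle'; exact absurd (lt_of_lt_of_le hclt hle') (lt_irrefl c))
        have hcount : List.count c (c' :: r) = 0 := List.count_eq_zero.mpr hnotin
        have hdrop : (c' :: r).dropWhile (· == c) = c' :: r := by
          simp [hcc]
        rw [h1, hcount, hdrop]
        simp

-- on a sorted list, the run lengths are exactly the counts of its elements
lemma mem_pvRuns (n : Nat) : ∀ (s : List Char), s.length ≤ n → s.Pairwise (· ≤ ·) →
    ∀ r : Int, r ∈ pvRuns s 0 ↔ ∃ c, c ∈ s ∧ r = (s.count c : Int) := by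
  induction n with
  | zero =>
      intro s hs _ r
      have : s = [] := List.eq_nil_of_length_eq_zero (Nat.le_zero.mp hs)
      subst this; simp [pvRuns]
  | succ n ih =>
      intro s hs hp r
      cases s with
      | nil => simp [pvRuns]
      | cons c t =>
          have hle : ∀ y ∈ t, c ≤ y := (List.pairwise_cons.mp hp).1
          have hpt : t.Pairwise (· ≤ ·) := (List.pairwise_cons.mp hp).2
          set d := t.dropWhile (· == c) with hd
          have htd : t.takeWhile (· == c) ++ d = t := List.takeWhile_append_dropWhile
          have hdsub : d.Sublist t := List.dropWhile_sublist _
          have hpd : d.Pairwise (· ≤ ·) := hpt.sublist hdsub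
          have hcd : c ∉ d := by
            intro hin
            cases hdc : d with
            | nil => rw [hdc] at hin; exact absurd hin List.not_mem_nil
            | cons y dt =>
                have hne : d ≠ [] := by rw [hdc]; simp
                have hhead : (d.head hne == c) = false := List.head_dropWhile_not (· == c) (l := t) hne
                have hyhead : d.head hne = y := by simp [hdc]
                have hyc : y ≠ c := by intro h; rw [hyhead, h] at hhead; simp at hhead
                have h1 : c ≤ y := hle y (hdsub.mem (by rw [hdc]; simp))
                rw [hdc] at hin
                rcases List.mem_cons.mp hin with h | h
                · exact hyc h.symm
                · have h2 : y ≤ c := (List.pairwise_cons.mp (hdc ▸ hpd)).1 c h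
                  exact hyc (le_antisymm h2 h1)
          have hcount_eq : ∀ x : Char, x ≠ c → t.count x = d.count x := by
            intro x hx
            conv_lhs => rw [← htd]
            rw [List.count_append]
            have : List.count x (t.takeWhile (· == c)) = 0 := by
              apply List.count_eq_zero.mpr
              intro hmem
              have hpx : (x == c) = true := List.mem_takeWhile_imp (p := fun y => y == c) hmem
              exact hx (beq_iff_eq.mp hpx)
            omega
          have hdlen : d.length ≤ n := by
            have h1 : d.length ≤ t.length := hdsub.length_le
            have h2 : t.length ≤ n := by simpa using Nat.succ_le_succ_iff.mp (by simpa using hs)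
            omega
          rw [pvRuns_head t c 0 hle hpt, ← hd]
          constructor
          · intro hr
            rcases List.mem_cons.mp hr with h | h
            · refine ⟨c, by simp, ?_⟩
              rw [h]
              simp only [List.count_cons, beq_self_eq_true, if_true]
              push_cast; ring
            · rcases (ih d hdlen hpd r).mp h with ⟨x, hx, hrx⟩
              have hxc : x ≠ c := fun h' => hcd (h' ▸ hx)
              refine ⟨x, List.mem_cons_of_mem _ (hdsub.mem hx), ?_⟩
              rw [List.count_cons, if_neg (by simp [Ne.symm hxc])]
              rw [hrx, hcount_eq x hxc]
              simp
          · rintro ⟨x, hx, hrx⟩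
            by_cases hxc : x = c
            · subst hxc
              apply List.mem_cons.mpr
              left
              rw [hrx]
              simp only [List.count_cons, beq_self_eq_true, if_true]
              push_cast; ring
            · have hxt : x ∈ t := by
                rcases List.mem_cons.mp hx with h | h
                · exact absurd h hxc
                · exact h
              have hxd : x ∈ d := by
                rcases (List.mem_append.mp (htd ▸ hxt)) with h | h
                · have hpx : (x == c) = true := List.mem_takeWhile_imp (p := fun y => y == c) h
                  exact absurd (beq_iff_eq.mp hpx) hxc
                · exact h
              apply List.mem_cons_of_mem
              apply (ih d hdlen hpd r).mpr
              refine ⟨x, hxd, ?_⟩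
              rw [hrx, List.count_cons, if_neg (by simp [Ne.symm hxc]), hcount_eq x hxc]
              simp
            
-- membership in Counter(l).values: exactly the counts of elements of l
lemma mem_counter_values (l : List Char) (v : Int) :
    v ∈ (PySem.Dict.counter l).values ↔ ∃ c, c ∈ l ∧ v = (l.count c : Int) := by
  show v ∈ (PySem.Dict.counter l).items.map Prod.snd ↔ _
  rw [PySem.Dict.items_counter, List.map_map]
  simp only [List.mem_map, Function.comp]
  constructor
  · rintro ⟨c, hc, rfl⟩
    exact ⟨c, (PySem.Set.mem_ofList l c).mp hc, rfl⟩
  · rintro ⟨c, hc, rfl⟩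
    exact ⟨c, (PySem.Set.mem_ofList l c).mpr hc, rfl⟩

-- the per-entry maxima of A and B agree on a nonempty string
lemma entry_max_eq (g : String) (hg : g.toList ≠ []) :
    (PySem.List.max? (PySem.Dict.counter g.toList).values (fun v => v)).getD 0
      = (PySem.List.max? (pvRuns (PySem.List.sorted g.toList (fun c => c) false) 0) (fun v => v)).getD 0 := by
  set l := g.toList with hl
  set s := PySem.List.sorted l (fun c => c) false with hsdef
  have hperm : s.Perm l := PySem.List.sorted_perm l (fun c => c) false
  have hps : s.Pairwise (· ≤ ·) := PySem.List.sorted_pairwise l (fun c => c)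
  have hcount : ∀ x : Char, s.count x = l.count x := fun x => hperm.count_eq x
  have hmemr : ∀ r : Int, r ∈ pvRuns s 0 ↔ ∃ c, c ∈ l ∧ r = (l.count c : Int) := by
    intro r
    rw [mem_pvRuns s.length s (le_refl _) hps r]
    constructor
    · rintro ⟨c, hc, rfl⟩; exact ⟨c, hperm.mem_iff.mp hc, by rw [hcount]⟩
    · rintro ⟨c, hc, rfl⟩; exact ⟨c, hperm.mem_iff.mpr hc, by rw [hcount]⟩
  have hsne : s ≠ [] := by
    intro h; exact hg ((PySem.List.sorted_eq_nil_iff l (fun c => c) false).mp (hsdef ▸ h))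
  -- both max? are some
  obtain ⟨c₀, t₀, hs0⟩ : ∃ c t, s = c :: t := List.exists_cons_of_ne_nil hsne
  have hrne : pvRuns s 0 ≠ [] := hs0 ▸ pvRuns_ne_nil c₀ t₀ 0
  have hvne : (PySem.Dict.counter l).values ≠ [] := by
    intro h
    have : (l.count c₀ : Int) ∈ (PySem.Dict.counter l).values :=
      (mem_counter_values l _).mpr ⟨c₀, hperm.mem_iff.mp (hs0 ▸ List.mem_cons_self), rfl⟩
    rw [h] at this; exact absurd this (List.not_mem_nil)
  obtain ⟨mv, hmv⟩ : ∃ m, PySem.List.max? (PySem.Dict.counter l).values (fun v => v) = some m := by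
    cases hx : PySem.List.max? (PySem.Dict.counter l).values (fun v => v) with
    | none => exact absurd ((PySem.List.max?_eq_none_iff _ _).mp hx) hvne
    | some m => exact ⟨m, rfl⟩
  obtain ⟨mr, hmr⟩ : ∃ m, PySem.List.max? (pvRuns s 0) (fun v => v) = some m := by
    cases hx : PySem.List.max? (pvRuns s 0) (fun v => v) with
    | none => exact absurd ((PySem.List.max?_eq_none_iff _ _).mp hx) hrne
    | some m => exact ⟨m, rfl⟩
  rw [hmv, hmr]
  -- mutual membership + maximality
  have hmv_mem := PySem.List.max?_mem hmv
  have hmr_mem := PySem.List.max?_mem hmr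
  have h1 : mv ∈ pvRuns s 0 := (hmemr mv).mpr ((mem_counter_values l mv).mp hmv_mem)
  have h2 : mr ∈ (PySem.Dict.counter l).values := (mem_counter_values l mr).mpr ((hmemr mr).mp hmr_mem)
  have hle1 := PySem.List.max?_isMax hmr mv h1
  have hle2 := PySem.List.max?_isMax hmv mr h2
  simp only [Option.getD_some]
  exact le_antisymm hle1 hle2

-- the two accumulation steps write the same dict entry (defeq: modify k 0 (+1) = insert k (getD k 0 + 1))
lemma step_eq (rc : PySem.Dict Int Int) (result : List (String × String))
    (hpre : ((PySem.Dict.ofList result).get? "giai_dac_biet").getD "" ≠ "") :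
    rc.modify ((PySem.List.max? (PySem.Dict.counter (((PySem.Dict.ofList result).get? "giai_dac_biet").getD "").toList).values (fun v => v)).getD 0) 0 (· + 1)
      = rc.insert ((PySem.List.max? (pvRuns (PySem.List.sorted (((PySem.Dict.ofList result).get? "giai_dac_biet").getD "").toList (fun c => c) false) 0) (fun v => v)).getD 0)
          (rc.getD ((PySem.List.max? (pvRuns (PySem.List.sorted (((PySem.Dict.ofList result).get? "giai_dac_biet").getD "").toList (fun c => c) false) 0) (fun v => v)).getD 0) 0 + 1) := by
  have hg : (((PySem.Dict.ofList result).get? "giai_dac_biet").getD "").toList ≠ [] := by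
    intro hl
    exact hpre (by rw [← String.ofList_toList (s := ((PySem.Dict.ofList result).get? "giai_dac_biet").getD ""), hl])
  rw [entry_max_eq _ hg]
  rfl

lemma foldl_steps_eq (l : List (List (String × String))) :
    ∀ rc : PySem.Dict Int Int, (∀ r ∈ l, ((PySem.Dict.ofList r).get? "giai_dac_biet").getD "" ≠ "") →
    l.foldl (fun (repetition_count : PySem.Dict Int Int) result =>
      let gdb := ((PySem.Dict.ofList result).get? "giai_dac_biet").getD ""
      let digit_count := PySem.Dict.counter gdb.toList
      let max_repetition := (PySem.List.max? digit_count.values (fun v => v)).getD 0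
      repetition_count.modify max_repetition 0 (· + 1)) rc
    = l.foldl (fun (repetition_count : PySem.Dict Int Int) result =>
      let chars := PySem.List.sorted (((PySem.Dict.ofList result).get? "giai_dac_biet").getD "").toList (fun c => c) false
      let runs := pvRuns chars 0
      let max_repetition := (PySem.List.max? runs (fun v => v)).getD 0
      repetition_count.insert max_repetition (repetition_count.getD max_repetition 0 + 1)) rc := by
  induction l with
  | nil => intro rc _; rfl
  | cons r rest ih =>
      intro rc hpre
      simp only [List.foldl_cons]
      rw [step_eq rc r (hpre r (by simp))]
      exact ih _ (fun x hx => hpre x (List.mem_cons_of_mem _ hx))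

-- ===== VERDICT (by name: the statement is the Claim_ definition above) =====
theorem analyze_repetition_patterns_py_spec : Claim_equal_analyze_repetition_patterns_py := by
  intro data _hdom hpre
  unfold Spec_analyze_repetition_patterns_py analyze_repetition_patterns_py analyze_repetition_patterns_py_alt
  simp only []
  congr 1
  exact foldl_steps_eq data PySem.Dict.empty hpre
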